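-- pv_equiv track=rewrite | github.com/rahul21chavan/repo | plsql_to_pyspark_enhanced_Version2.py | _split_by_delimiter
-- ===== SOURCE A (Python) =====
-- from typing import Optional, List, Tuple
--
-- def _split_by_delimiter(plsql_code: str, delimiter: str = '/') -> List[str]:
--     """
--     Split PL/SQL code by delimiter (default: '/') as logical blocks.
--     """
--     code = plsql_code.replace('\r\n', '\n').replace('\r', '\n')
--     blocks = []
--     buff = []
--     for line in code.split('\n'):
--         if line.strip() == delimiter:
--             if buff:
--                 blocks.append('\n'.join(buff).strip())
--                 buff = []
--         else:
--             buff.append(line)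
--     if buff:
--         blocks.append('\n'.join(buff).strip())
--     return [b for b in blocks if b.strip()]
-- ===== SOURCE B (Python) =====
-- from typing import List
--
-- def _split_by_delimiter(plsql_code: str, delimiter: str = '/') -> List[str]:
--     """Cut at delimiter-line indices and slice, instead of a buffer/flush loop."""
--     lines = plsql_code.replace('\r\n', '\n').replace('\r', '\n').split('\n')
--     cuts = [-1] + [i for i, ln in enumerate(lines) if ln.strip() == delimiter] + [len(lines)]
--     blocks = ('\n'.join(lines[a + 1:b]).strip() for a, b in zip(cuts, cuts[1:]))
--     return [b for b in blocks if b]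
-- ===== Notes on version B (the rewrite author's own statement) =====
-- stated objective: alternative
-- what changed: B replaces A's line-by-line buffer/flush accumulator loop with a cut-index decomposition: it collects the indices of delimiter lines once, then slices the line list between consecutive cuts and strips/filters the chunks.
import Mathlib
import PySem

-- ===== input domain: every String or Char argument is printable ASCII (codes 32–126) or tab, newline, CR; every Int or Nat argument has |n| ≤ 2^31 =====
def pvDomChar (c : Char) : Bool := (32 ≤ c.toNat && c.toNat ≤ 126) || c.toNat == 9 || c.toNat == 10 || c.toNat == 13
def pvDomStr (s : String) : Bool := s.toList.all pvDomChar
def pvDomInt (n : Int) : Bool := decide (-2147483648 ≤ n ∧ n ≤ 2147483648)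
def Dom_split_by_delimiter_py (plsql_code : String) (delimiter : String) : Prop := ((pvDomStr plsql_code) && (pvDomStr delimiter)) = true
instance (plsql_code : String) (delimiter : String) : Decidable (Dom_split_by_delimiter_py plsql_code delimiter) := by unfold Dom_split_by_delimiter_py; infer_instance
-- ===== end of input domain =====

-- B cuts the line list at the delimiter-line indices and slices between consecutive cuts,
-- instead of A's buffer-and-flush accumulator loop; same return value, proved equal below.

-- ===== PORT A =====
-- the body of A's `for line in code.split('\n')` loop, as a named fold step
def pvStepA (delim : List Char) (st : List (List Char) × List (List Char)) (line : List Char) :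
    List (List Char) × List (List Char) :=
  if PySem.Chars.strip line = delim then
    (if st.2 ≠ [] then (st.1 ++ [PySem.Chars.strip (PySem.Chars.join ['\n'] st.2)], []) else st)
  else (st.1, st.2 ++ [line])

def split_by_delimiter_py (plsql_code : String) (delimiter : String) : List String :=
  let code := PySem.Str.replace (PySem.Str.replace plsql_code "\r\n" "\n") "\r" "\n"
  let lines := PySem.Chars.splitOn code.toList ['\n']
  let st := lines.foldl (pvStepA delimiter.toList) ([], [])
  let blocks := if st.2 ≠ [] then st.1 ++ [PySem.Chars.strip (PySem.Chars.join ['\n'] st.2)] else st.1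
  (blocks.filter (fun b => PySem.Chars.strip b != [])).map String.ofList

-- ===== PORT B =====
def split_by_delimiter_py_alt (plsql_code : String) (delimiter : String) : List String :=
  let lines := PySem.Chars.splitOn
    (PySem.Str.replace (PySem.Str.replace plsql_code "\r\n" "\n") "\r" "\n").toList ['\n']
  let cuts : List Int := -1 ::
    (((PySem.List.enumerate lines).filterMap
        (fun pr => if PySem.Chars.strip pr.2 = delimiter.toList then some pr.1 else none)) ++
      [(lines.length : Int)])
  let blocks := (cuts.zip cuts.tail).map (fun pr =>
    PySem.Chars.strip (PySem.Chars.join ['\n'] (PySem.List.slice lines (some (pr.1 + 1)) (some pr.2))))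
  (blocks.filter (fun b => b != [])).map String.ofList

-- ===== PRECONDITION & SPEC =====
def Spec_split_by_delimiter_py (plsql_code : String) (delimiter : String) (out : List String) : Prop := out = split_by_delimiter_py_alt plsql_code delimiter
instance (plsql_code : String) (delimiter : String) (out : List String) : Decidable (Spec_split_by_delimiter_py plsql_code delimiter out) := by unfold Spec_split_by_delimiter_py; infer_instance

-- ===== CLAIM (what is proved, stated in full; the proofs are below) =====
def Claim_equal_split_by_delimiter_py : Prop := ∀ (plsql_code : String) (delimiter : String), Dom_split_by_delimiter_py plsql_code delimiter → Spec_split_by_delimiter_py plsql_code delimiter (split_by_delimiter_py plsql_code delimiter)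

-- ===== LEMMAS AND PROOFS =====

-- strip ∘ join applied to a segment of lines
def pvF (seg : List (List Char)) : List Char :=
  PySem.Chars.strip (PySem.Chars.join ['\n'] seg)

-- A's loop, recursively: blocks emitted from pending buffer `buff` over the remaining lines
def pvArec (d : List Char) : List (List Char) → List (List Char) → List (List Char)
  | buff, [] => if buff = [] then [] else [pvF buff]
  | buff, l :: ls =>
      if PySem.Chars.strip l = d then
        (if buff = [] then [] else [pvF buff]) ++ pvArec d [] ls
      else pvArec d (buff ++ [l]) ls

-- delimiter-line indices, as in B
def pvIdx (d : List Char) (ls : List (List Char)) : List Int :=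
  (PySem.List.enumerate ls).filterMap
    (fun pr => if PySem.Chars.strip pr.2 = d then some pr.1 else none)

theorem pv_fold_arec (d : List Char) (ls : List (List Char)) (bs buf : List (List Char)) :
    (if (ls.foldl (pvStepA d) (bs, buf)).2 ≠ [] then
       (ls.foldl (pvStepA d) (bs, buf)).1 ++ [pvF (ls.foldl (pvStepA d) (bs, buf)).2]
     else (ls.foldl (pvStepA d) (bs, buf)).1) = bs ++ pvArec d buf ls := by
  induction ls generalizing bs buf with
  | nil =>
    by_cases h : buf = [] <;> simp [pvArec, h, pvF]
  | cons l ls ih =>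
    by_cases hd : PySem.Chars.strip l = d
    · by_cases hb : buf = []
      · simp only [List.foldl_cons]
        rw [show pvStepA d (bs, buf) l = (bs, buf) by simp [pvStepA, hd, hb]]
        simpa [pvArec, hd, hb] using ih bs buf
      · simp only [List.foldl_cons]
        rw [show pvStepA d (bs, buf) l = (bs ++ [pvF buf], []) by simp [pvStepA, hd, hb, pvF]]
        simpa [pvArec, hd, hb] using ih (bs ++ [pvF buf]) []
    · simp only [List.foldl_cons]
      rw [show pvStepA d (bs, buf) l = (bs, buf ++ [l]) by simp [pvStepA, hd]]
      rw [pvArec.eq_def]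
      simp only [hd]
      exact ih bs (buf ++ [l])

theorem pv_dropWhile_rdropWhile (p : Char → Bool) (y : List Char)
    (h : List.dropWhile p y = y) :
    List.dropWhile p (List.rdropWhile p y) = List.rdropWhile p y := by
  rcases e : List.rdropWhile p y with _ | ⟨a, t⟩
  · simp
  · have hpre : List.rdropWhile p y <+: y := List.rdropWhile_prefix p y
    rw [e] at hpre
    obtain ⟨s, hs⟩ := hpre
    rw [List.cons_append] at hs
    by_cases hpa : p a = true
    · exfalso
      rw [← hs, List.dropWhile_cons_of_pos hpa] at h
      have h1 : (List.dropWhile p (t ++ s)).length ≤ (t ++ s).length :=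
        List.length_dropWhile_le p (t ++ s)
      rw [h] at h1
      simp at h1
    · simp [hpa]

theorem pv_strip_idem (s : List Char) :
    PySem.Chars.strip (PySem.Chars.strip s) = PySem.Chars.strip s := by
  have hr : ∀ x : List Char, PySem.Chars.rstrip x = List.rdropWhile PySem.Chars.isspace x := by
    intro x; simp [PySem.Chars.rstrip, List.rdropWhile]
  simp only [PySem.Chars.strip, PySem.Chars.lstrip, hr]
  rw [pv_dropWhile_rdropWhile _ _ (List.dropWhile_idempotent _ _),
      List.rdropWhile_idempotent]

theorem pvF_nil : pvF [] = [] := by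
  simp [pvF, PySem.Chars.join_nil]
  rfl

theorem pv_arec_splitOnP (d : List Char) (ls : List (List Char)) (buff : List (List Char)) :
    (pvArec d buff ls).filter (fun b => PySem.Chars.strip b != []) =
      (((List.splitOnP (fun l => PySem.Chars.strip l == d) ls).modifyHead
          (fun seg => buff ++ seg)).map pvF).filter (fun b => b != []) := by
  induction ls generalizing buff with
  | nil =>
    by_cases h : buff = []
    · simp [pvArec, h, pvF_nil, List.splitOnP_nil]
    · simp [pvArec, h, List.splitOnP_nil, List.filter, pv_strip_idem (PySem.Chars.join ['\n'] buff), pvF]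
  | cons l ls ih =>
    rw [pvArec.eq_def, List.splitOnP_cons]
    by_cases hd : PySem.Chars.strip l = d
    · simp only [hd, beq_self_eq_true, if_pos]
      rw [List.filter_append]
      have hchunk : (if buff = [] then [] else [pvF buff]).filter
          (fun b => PySem.Chars.strip b != []) = [pvF buff].filter (fun b => b != []) := by
        by_cases h : buff = []
        · simp [h, pvF_nil]
        · simp [h, List.filter, pvF, pv_strip_idem]
      rw [hchunk, ih []]
      have hmod : (List.splitOnP (fun l => PySem.Chars.strip l == d) ls).modifyHead
          (fun seg => ([] : List (List Char)) ++ seg) =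
          List.splitOnP (fun l => PySem.Chars.strip l == d) ls := by
        cases List.splitOnP (fun l => PySem.Chars.strip l == d) ls <;> simp
      rw [hmod]
      by_cases hpf : pvF buff = [] <;> simp [hpf]
    · have hbeq : (PySem.Chars.strip l == d) = false := by simp [hd]
      simp only [hd, hbeq, Bool.false_eq_true, if_false]
      rw [ih (buff ++ [l]), List.modifyHead_modifyHead]
      have hfun : ((fun seg => buff ++ seg) ∘ List.cons l) =
          (fun seg => buff ++ [l] ++ seg) := by funext seg; simp
      rw [hfun]

theorem pv_enum_shift {α : Type} (xs : List α) (s : Int) :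
    PySem.List.enumerate xs (s + 1) = (PySem.List.enumerate xs s).map (fun pr => (pr.1 + 1, pr.2)) := by
  induction xs generalizing s with
  | nil => simp [PySem.List.enumerate]
  | cons x xs ih => rw [PySem.List.enumerate_cons, PySem.List.enumerate_cons, ih]; simp

theorem pv_idx_cons (d : List Char) (l : List Char) (ls : List (List Char)) :
    pvIdx d (l :: ls) =
      (if PySem.Chars.strip l = d then [(0 : Int)] else []) ++ (pvIdx d ls).map (· + 1) := by
  unfold pvIdx
  rw [PySem.List.enumerate_cons, List.filterMap_cons]
  have h1 : PySem.List.enumerate ls ((0:Int) + 1) =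
      (PySem.List.enumerate ls 0).map (fun pr => (pr.1 + 1, pr.2)) := pv_enum_shift ls 0
  rw [h1, List.filterMap_map]
  have h2 : ((fun pr : Int × List Char => if PySem.Chars.strip pr.2 = d then some pr.1 else none) ∘
        (fun pr : Int × List Char => (pr.1 + 1, pr.2))) =
      (fun pr : Int × List Char =>
        ((if PySem.Chars.strip pr.2 = d then some pr.1 else none).map (· + 1))) := by
    funext pr; by_cases h : PySem.Chars.strip pr.2 = d <;> simp [h]
  rw [h2, ← List.map_filterMap]
  by_cases hd : PySem.Chars.strip l = d <;> simp [hd]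

theorem pv_idx_nonneg (d : List Char) (ls : List (List Char)) :
    ∀ x ∈ pvIdx d ls, 0 ≤ x := by
  intro x hx
  unfold pvIdx at hx
  obtain ⟨pr, hpr, hf⟩ := List.mem_filterMap.mp hx
  rw [PySem.List.mem_enumerate_iff] at hpr
  obtain ⟨k, hk, rfl⟩ := hpr
  split at hf
  · cases hf; omega
  · cases hf

theorem pv_slice_shift (l : List Char) (ls : List (List Char)) (a b : Int)
    (ha : -1 ≤ a) (hb : 0 ≤ b) :
    PySem.List.slice (l :: ls) (some (a + 1 + 1)) (some (b + 1)) =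
      PySem.List.slice ls (some (a + 1)) (some b) := by
  obtain ⟨m, hm⟩ : ∃ m : Nat, a + 1 = (m : Int) := ⟨(a + 1).toNat, by omega⟩
  obtain ⟨k, hk⟩ : ∃ k : Nat, b = (k : Int) := ⟨b.toNat, by omega⟩
  rw [hm, hk, show ((m : Int) + 1) = ((m + 1 : Nat) : Int) by push_cast; ring,
      show ((k : Int) + 1) = ((k + 1 : Nat) : Int) by push_cast; ring,
      PySem.List.slice_natCast, PySem.List.slice_natCast]
  simp [List.drop_succ_cons, Nat.succ_sub_succ]

theorem pv_slice_zero (l : List Char) (ls : List (List Char)) (b : Int) (hb : 0 ≤ b) :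
    PySem.List.slice (l :: ls) (some ((-1 : Int) + 1)) (some (b + 1)) =
      l :: PySem.List.slice ls (some ((-1 : Int) + 1)) (some b) := by
  obtain ⟨k, hk⟩ : ∃ k : Nat, b = (k : Int) := ⟨b.toNat, by omega⟩
  rw [hk, show ((-1 : Int) + 1) = ((0 : Nat) : Int) by norm_num,
      show ((k : Int) + 1) = ((k + 1 : Nat) : Int) by push_cast; ring,
      PySem.List.slice_natCast, PySem.List.slice_natCast]
  simp

theorem pv_seg (d : List Char) (ls : List (List Char)) :
    (((-1 : Int) :: (pvIdx d ls ++ [(ls.length : Int)])).zip (pvIdx d ls ++ [(ls.length : Int)])).map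
        (fun pr => PySem.List.slice ls (some (pr.1 + 1)) (some pr.2)) =
      List.splitOnP (fun l => PySem.Chars.strip l == d) ls := by
  induction ls with
  | nil =>
    rw [List.splitOnP_nil]
    simp only [pvIdx, PySem.List.enumerate, List.filterMap_nil, List.nil_append,
      List.length_nil, Nat.cast_zero, List.zip_cons_cons, List.zip_nil_right, List.map_cons,
      List.map_nil]
    rw [show ((-1 : Int) + 1) = ((0 : Nat) : Int) by norm_num,
        show (0 : Int) = ((0 : Nat) : Int) by norm_num, PySem.List.slice_natCast]
    simp
  | cons l ls ih =>
    have hrest_nonneg : ∀ x ∈ pvIdx d ls ++ [(ls.length : Int)], 0 ≤ x := by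
      intro x hx
      rcases List.mem_append.mp hx with h | h
      · exact pv_idx_nonneg d ls x h
      · simp at h; omega
    set rest := pvIdx d ls ++ [(ls.length : Int)] with hrest
    have hcuts : pvIdx d (l :: ls) ++ [((l :: ls).length : Int)] =
        (if PySem.Chars.strip l = d then [(0 : Int)] else []) ++ rest.map (· + 1) := by
      rw [pv_idx_cons, hrest]
      by_cases hd : PySem.Chars.strip l = d <;>
        simp [hd, List.map_append]
    rw [hcuts, List.splitOnP_cons]
    by_cases hd : PySem.Chars.strip l = d
    · simp only [hd, beq_self_eq_true, if_pos]
      have h0 : ([(0 : Int)] ++ rest.map (· + 1)) =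
          ((-1 : Int) :: rest).map (· + 1) := by simp
      rw [h0]
      have hzip : (((-1 : Int) :: ((-1 : Int) :: rest).map (· + 1)).zip (((-1 : Int) :: rest).map (· + 1))) =
          ((-1 : Int), ((-1 : Int) + 1)) :: (((-1 : Int) :: rest).map (· + 1)).zip (rest.map (· + 1)) := by
        simp [List.zip_cons_cons]
      rw [hzip, List.zip_map, List.map_cons, List.map_map]
      have hhead : PySem.List.slice (l :: ls) (some ((-1 : Int) + 1)) (some ((-1 : Int) + 1)) = [] := by
        rw [show ((-1 : Int) + 1) = ((0 : Nat) : Int) by norm_num, PySem.List.slice_natCast]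
        simp
      rw [hhead]
      congr 1
      rw [← ih]
      apply List.map_congr_left
      intro pr hpr
      obtain ⟨h1, h2⟩ := List.of_mem_zip hpr
      have ha : -1 ≤ pr.1 := by
        rcases List.mem_cons.mp h1 with h | h
        · omega
        · have := hrest_nonneg pr.1 h; omega
      have hb : 0 ≤ pr.2 := hrest_nonneg pr.2 h2
      simp only [Function.comp, Prod.map]
      exact pv_slice_shift l ls pr.1 pr.2 ha hb
    · have hbeq : (PySem.Chars.strip l == d) = false := by simp [hd]
      simp only [hbeq, Bool.false_eq_true, if_false]
      obtain ⟨r0, rt, he⟩ : ∃ r0 rt, rest = r0 :: rt := by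
        rw [hrest]
        cases pvIdx d ls with
        | nil => exact ⟨_, _, rfl⟩
        | cons a t => exact ⟨_, _, rfl⟩
      rw [he] at hrest_nonneg ⊢
      have h0 : (if PySem.Chars.strip l = d then [(0 : Int)] else []) ++ (r0 :: rt).map (· + 1) =
          (r0 + 1) :: rt.map (· + 1) := by simp [hd]
      rw [h0]
      have hr0 : (0 : Int) ≤ r0 := hrest_nonneg r0 (by simp)
      rw [← ih, he]
      have hzip1 : (((-1 : Int) :: r0 :: rt).zip (r0 :: rt)) =
          ((-1 : Int), r0) :: ((r0 :: rt).zip rt) := by simp [List.zip_cons_cons]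
      rw [hzip1, List.map_cons]
      have hzip2 : (((-1 : Int) :: (r0 + 1) :: rt.map (· + 1)).zip ((r0 + 1) :: rt.map (· + 1))) =
          ((-1 : Int), r0 + 1) :: (((r0 :: rt).map (· + 1)).zip (rt.map (· + 1))) := by
        simp [List.zip_cons_cons]
      rw [hzip2, List.map_cons, List.zip_map, List.map_map]
      have hhead : PySem.List.slice (l :: ls) (some ((-1 : Int) + 1)) (some (r0 + 1)) =
          l :: PySem.List.slice ls (some ((-1 : Int) + 1)) (some r0) := pv_slice_zero l ls r0 hr0
      rw [hhead]
      rw [List.modifyHead_cons]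
      congr 1
      apply List.map_congr_left
      intro pr hpr
      obtain ⟨h1, h2⟩ := List.of_mem_zip hpr
      have ha : -1 ≤ pr.1 := by
        rcases List.mem_cons.mp h1 with h | h
        · omega
        · have := hrest_nonneg pr.1 (by simp [h]); omega
      have hb : 0 ≤ pr.2 := hrest_nonneg pr.2 (by simp [h2])
      simp only [Function.comp, Prod.map]
      exact pv_slice_shift l ls pr.1 pr.2 ha hb

-- both sides equal the filtered strip∘join image of List.splitOnP on the line list
theorem pv_main (d : List Char) (ls : List (List Char)) :
    ((if (ls.foldl (pvStepA d) ([], [])).2 ≠ [] then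
        (ls.foldl (pvStepA d) ([], [])).1 ++
          [PySem.Chars.strip (PySem.Chars.join ['\n'] (ls.foldl (pvStepA d) ([], [])).2)]
      else (ls.foldl (pvStepA d) ([], [])).1).filter (fun b => PySem.Chars.strip b != [])) =
    ((((-1 : Int) :: (pvIdx d ls ++ [(ls.length : Int)])).zip (pvIdx d ls ++ [(ls.length : Int)])).map
        (fun pr => PySem.Chars.strip
          (PySem.Chars.join ['\n'] (PySem.List.slice ls (some (pr.1 + 1)) (some pr.2))))).filter
      (fun b => b != []) := by
  have hA := pv_fold_arec d ls [] []
  simp only [List.nil_append] at hA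
  rw [show [PySem.Chars.strip (PySem.Chars.join ['\n'] (ls.foldl (pvStepA d) ([], [])).2)] =
        [pvF (ls.foldl (pvStepA d) ([], [])).2] from rfl, hA, pv_arec_splitOnP]
  have hmod : (List.splitOnP (fun l => PySem.Chars.strip l == d) ls).modifyHead
      (fun seg => ([] : List (List Char)) ++ seg) =
      List.splitOnP (fun l => PySem.Chars.strip l == d) ls := by
    cases List.splitOnP (fun l => PySem.Chars.strip l == d) ls <;> simp
  rw [hmod]
  have hB : (((-1 : Int) :: (pvIdx d ls ++ [(ls.length : Int)])).zip
        (pvIdx d ls ++ [(ls.length : Int)])).map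
        (fun pr => PySem.Chars.strip
          (PySem.Chars.join ['\n'] (PySem.List.slice ls (some (pr.1 + 1)) (some pr.2)))) =
      (List.splitOnP (fun l => PySem.Chars.strip l == d) ls).map pvF := by
    rw [← pv_seg d ls, List.map_map]
    rfl
  rw [hB]

-- ===== VERDICT (by name: the statement is the Claim_ definition above) =====
theorem split_by_delimiter_py_spec : Claim_equal_split_by_delimiter_py := by
  intro plsql_code delimiter _
  unfold Spec_split_by_delimiter_py
  simp only [split_by_delimiter_py, split_by_delimiter_py_alt]
  have h := pv_main delimiter.toList
    (PySem.Chars.splitOn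
      (PySem.Str.replace (PySem.Str.replace plsql_code "\r\n" "\n") "\r" "\n").toList ['\n'])
  unfold pvIdx at h
  exact congrArg (List.map String.ofList) h
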